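-- pv_equiv track=rewrite | github.com/aa-blinov/self-hosted-search-agent | search_agent/infrastructure/intelligence.py | _digit_tokens
-- ===== SOURCE A (Python) =====
-- def _digit_tokens(text: str) -> set[str]:
--     tokens: set[str] = set()
--     current: list[str] = []
--     for ch in text or "":
--         if ch.isalnum() or ch in {".", "-", "/"}:
--             current.append(ch)
--             continue
--         if current:
--             token = "".join(current).strip(".,-/")
--             if token and any(char.isdigit() for char in token):
--                 tokens.add(token.casefold())
--             current = []
--     if current:
--         token = "".join(current).strip(".,-/")
--         if token and any(char.isdigit() for char in token):
--             tokens.add(token.casefold())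
--     return tokens
-- ===== SOURCE B (Python) =====
-- def _digit_tokens(text: str) -> set[str]:
--     cleaned = "".join(ch if (ch.isalnum() or ch in "./-") else " " for ch in (text or ""))
--     tokens: set[str] = set()
--     for token in cleaned.split():
--         token = token.strip(".,-/")
--         if token and any(c.isdigit() for c in token):
--             tokens.add(token.casefold())
--     return tokens
-- ===== Notes on version B (the rewrite author's own statement) =====
-- stated objective: simpler
-- what changed: Replaces A's explicit char-by-char state machine (current-run accumulator with duplicated flush logic in the loop and after it) by a single cleaning map (disallowed chars become spaces) followed by str.split() and one filter loop over the tokens.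
import Mathlib
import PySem

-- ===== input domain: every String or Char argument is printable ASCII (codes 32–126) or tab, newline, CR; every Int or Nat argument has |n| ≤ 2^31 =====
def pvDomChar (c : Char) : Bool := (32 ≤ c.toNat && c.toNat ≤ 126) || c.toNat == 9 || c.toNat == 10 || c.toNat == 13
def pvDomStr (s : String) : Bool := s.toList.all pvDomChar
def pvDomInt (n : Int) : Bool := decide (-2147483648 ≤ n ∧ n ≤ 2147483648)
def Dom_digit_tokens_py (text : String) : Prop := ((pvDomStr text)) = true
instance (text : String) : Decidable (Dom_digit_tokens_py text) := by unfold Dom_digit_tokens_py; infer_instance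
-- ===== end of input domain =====

-- B replaces A's char-by-char state machine by "map disallowed chars to spaces, split(), filter" — simpler decomposition, same cost.


-- ===== PORT A =====
-- ch.isalnum() or ch in {".", "-", "/"}
def pvAllowedA (c : Char) : Bool := PySem.Chars.isalnum c || ['.', '-', '/'].contains c

-- token = "".join(current).strip(".,-/"); if token and any(isdigit): tokens.add(token.casefold())
-- (casefold ported as Chars.lower: exact on the ASCII domain)
def pvEmitA (tokens : PySem.Set (List Char)) (cur : List Char) : PySem.Set (List Char) :=
  let token := PySem.Chars.stripChars cur ['.', ',', '-', '/']
  if !token.isEmpty && token.any PySem.Chars.isdigit then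
    PySem.Set.add tokens (PySem.Chars.lower token)
  else tokens

-- loop body over one character ch with state (tokens, current)
def pvStepA (st : PySem.Set (List Char) × List Char) (ch : Char) :
    PySem.Set (List Char) × List Char :=
  if pvAllowedA ch then (st.1, st.2 ++ [ch])
  else if !st.2.isEmpty then (pvEmitA st.1 st.2, [])
  else (st.1, [])

def digit_tokens_py (text : String) : List String :=
  let st := text.toList.foldl pvStepA (PySem.Set.empty, [])
  (if !st.2.isEmpty then pvEmitA st.1 st.2 else st.1).map String.ofList

-- ===== PORT B =====
-- ch if (ch.isalnum() or ch in "./-") else " "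
def pvAllowedB (c : Char) : Bool := PySem.Chars.isalnum c || (c == '.' || c == '/' || c == '-')

-- body of B's for-loop over a split() token
def pvProcessB (s : PySem.Set (List Char)) (token : List Char) : PySem.Set (List Char) :=
  let t := PySem.Chars.stripChars token ['.', ',', '-', '/']
  if !t.isEmpty && t.any PySem.Chars.isdigit then
    PySem.Set.add s (PySem.Chars.lower t)
  else s

def digit_tokens_py_alt (text : String) : List String :=
  let cleaned := text.toList.map (fun c => if pvAllowedB c then c else ' ')
  ((PySem.Chars.split₀ cleaned).foldl pvProcessB PySem.Set.empty).map String.ofList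

-- ===== PRECONDITION & SPEC =====
def Spec_digit_tokens_py (text : String) (out : List String) : Prop := out = digit_tokens_py_alt text
instance (text : String) (out : List String) : Decidable (Spec_digit_tokens_py text out) := by unfold Spec_digit_tokens_py; infer_instance

-- ===== CLAIM (what is proved, stated in full; the proofs are below) =====
def Claim_equal_digit_tokens_py : Prop := ∀ (text : String), Dom_digit_tokens_py text → Spec_digit_tokens_py text (digit_tokens_py text)

-- ===== LEMMAS AND PROOFS =====

theorem pvAllowedB_eq (c : Char) : pvAllowedB c = pvAllowedA c := by
  simp only [pvAllowedA, pvAllowedB, List.contains_cons, List.contains_nil, Bool.or_false]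
  cases PySem.Chars.isalnum c <;> cases h1 : c == '.' <;> cases h2 : c == '-' <;>
    cases h3 : c == '/' <;> simp

theorem pvProcessB_eq : pvProcessB = pvEmitA := rfl

theorem pvAllowed_not_space (c : Char) (h : pvAllowedA c = true) :
    PySem.Chars.isspace c = false := by
  have hb : (48 ≤ c.toNat ∧ c.toNat ≤ 57) ∨ (65 ≤ c.toNat ∧ c.toNat ≤ 90) ∨
      (97 ≤ c.toNat ∧ c.toNat ≤ 122) ∨ c.toNat = 46 ∨ c.toNat = 45 ∨ c.toNat = 47 := by
    simp only [pvAllowedA, PySem.Chars.isalnum, PySem.Chars.isalpha, PySem.Chars.isdigit,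
      PySem.Chars.isupper, PySem.Chars.islower, List.contains_cons, Bool.or_eq_true,
      decide_eq_true_eq, Bool.and_eq_true, List.contains_nil, Bool.or_false, beq_iff_eq,
      Char.le_def, UInt32.le_iff_toNat_le] at h
    rcases h with ((⟨h1, h2⟩ | ⟨h1, h2⟩) | ⟨h1, h2⟩) | h1 | h1 | h1
    · exact Or.inr (Or.inl ⟨h1, h2⟩)
    · exact Or.inr (Or.inr (Or.inl ⟨h1, h2⟩))
    · exact Or.inl ⟨h1, h2⟩
    · subst h1; right; right; right; left; rfl
    · subst h1; right; right; right; right; left; rfl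
    · subst h1; right; right; right; right; right; rfl
  simp only [PySem.Chars.isspace, Bool.or_eq_false_iff, Bool.and_eq_false_iff,
    decide_eq_false_iff_not]
  omega

theorem pv_go_acc (l : List Char) : ∀ (cur : List Char) (acc : List (List Char)),
    PySem.Chars.split₀.go l cur acc = acc.reverse ++ PySem.Chars.split₀.go l cur [] := by
  induction l with
  | nil => intro cur acc; by_cases h : cur.isEmpty <;> simp [PySem.Chars.split₀.go, h]
  | cons c rest ih =>
    intro cur acc
    by_cases hs : PySem.Chars.isspace c
    · by_cases hc : cur.isEmpty
      · simp only [PySem.Chars.split₀.go, hs, if_true, hc]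
        exact ih [] acc
      · have hc' : cur.isEmpty = false := by simpa using hc
        simp only [PySem.Chars.split₀.go, hs, if_true, hc', Bool.false_eq_true, if_false]
        rw [ih [] (cur.reverse :: acc), ih [] [cur.reverse]]
        simp
    · have hs' : PySem.Chars.isspace c = false := by simpa using hs
      simp only [PySem.Chars.split₀.go, hs', Bool.false_eq_true, if_false]
      exact ih (c :: cur) acc

theorem pv_go_nonspace (w : List Char) (hw : ∀ c ∈ w, PySem.Chars.isspace c = false) :
    ∀ (l cur : List Char) (acc : List (List Char)),
    PySem.Chars.split₀.go (w ++ l) cur acc = PySem.Chars.split₀.go l (w.reverse ++ cur) acc := by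
  induction w with
  | nil => intro l cur acc; simp
  | cons c w ih =>
    intro l cur acc
    have hc : PySem.Chars.isspace c = false := hw c (by simp)
    have hw' : ∀ x ∈ w, PySem.Chars.isspace x = false := fun x hx => hw x (by simp [hx])
    simp only [List.cons_append, PySem.Chars.split₀.go, hc, Bool.false_eq_true, if_false]
    rw [ih hw']
    simp

theorem pv_split₀_space_cons (c : Char) (l : List Char) (h : PySem.Chars.isspace c = true) :
    PySem.Chars.split₀ (c :: l) = PySem.Chars.split₀ l := by
  simp [PySem.Chars.split₀, PySem.Chars.split₀.go, h]

theorem pv_split₀_run_nil (w : List Char) (hw : ∀ c ∈ w, PySem.Chars.isspace c = false)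
    (hne : w ≠ []) : PySem.Chars.split₀ w = [w] := by
  have := pv_go_nonspace w hw [] [] []
  simp only [List.append_nil] at this
  unfold PySem.Chars.split₀
  rw [this]
  simp [PySem.Chars.split₀.go, List.isEmpty_iff, hne]

theorem pv_split₀_run (w rest : List Char) (hw : ∀ c ∈ w, PySem.Chars.isspace c = false)
    (hne : w ≠ []) :
    PySem.Chars.split₀ (w ++ ' ' :: rest) = w :: PySem.Chars.split₀ rest := by
  unfold PySem.Chars.split₀
  rw [pv_go_nonspace w hw]
  simp only [List.append_nil]
  have hsp : PySem.Chars.isspace ' ' = true := by decide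
  simp only [PySem.Chars.split₀.go, hsp, if_true, List.isEmpty_iff, List.reverse_eq_nil_iff,
    hne, if_false, List.reverse_reverse]
  rw [pv_go_acc]
  simp

theorem pv_loop (cs : List Char) : ∀ (tokens : PySem.Set (List Char)) (cur : List Char),
    (∀ c ∈ cur, pvAllowedA c = true) →
    (let st := cs.foldl pvStepA (tokens, cur);
     if !st.2.isEmpty then pvEmitA st.1 st.2 else st.1)
    = (PySem.Chars.split₀ (cur ++ cs.map (fun c => if pvAllowedA c then c else ' '))).foldl
        pvEmitA tokens := by
  induction cs with
  | nil =>
    intro tokens cur hcur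
    by_cases h : cur = []
    · subst h; simp [PySem.Chars.split₀, PySem.Chars.split₀.go]
    · have hns : ∀ c ∈ cur, PySem.Chars.isspace c = false :=
        fun c hc => pvAllowed_not_space c (hcur c hc)
      have hce : cur.isEmpty = false := by simp [h]
      simp only [List.foldl_nil, List.map_nil, List.append_nil, pv_split₀_run_nil cur hns h,
        List.foldl_cons, List.foldl_nil, hce, Bool.not_false, if_true]
  | cons c cs ih =>
    intro tokens cur hcur
    by_cases hc : pvAllowedA c = true
    · have : pvStepA (tokens, cur) c = (tokens, cur ++ [c]) := by
        simp [pvStepA, hc]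
      simp only [List.foldl_cons, this, List.map_cons, hc, if_true]
      have hcur' : ∀ x ∈ cur ++ [c], pvAllowedA x = true := by
        intro x hx
        rcases List.mem_append.mp hx with h1 | h1
        · exact hcur x h1
        · simp at h1; subst h1; exact hc
      have := ih tokens (cur ++ [c]) hcur'
      simpa using this
    · have hc' : pvAllowedA c = false := by simpa using hc
      by_cases h : cur = []
      · subst h
        have : pvStepA (tokens, []) c = (tokens, []) := by simp [pvStepA, hc']
        simp only [List.foldl_cons, this, List.map_cons, hc', Bool.false_eq_true, if_false,
          List.nil_append]
        rw [pv_split₀_space_cons ' ' _ (by decide)]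
        exact ih tokens [] (by intro x hx; cases hx)
      · have hns : ∀ x ∈ cur, PySem.Chars.isspace x = false :=
          fun x hx => pvAllowed_not_space x (hcur x hx)
        have : pvStepA (tokens, cur) c = (pvEmitA tokens cur, []) := by
          simp [pvStepA, hc', h]
        simp only [List.foldl_cons, this, List.map_cons, hc', Bool.false_eq_true, if_false]
        rw [pv_split₀_run cur _ hns h, List.foldl_cons]
        exact ih (pvEmitA tokens cur) [] (by intro x hx; cases hx)

-- ===== VERDICT (by name: the statement is the Claim_ definition above) =====
theorem digit_tokens_py_spec : Claim_equal_digit_tokens_py := by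
  intro text _
  unfold Spec_digit_tokens_py digit_tokens_py digit_tokens_py_alt
  rw [pvProcessB_eq]
  have hB : (text.toList.map (fun c => if pvAllowedB c then c else ' '))
      = text.toList.map (fun c => if pvAllowedA c then c else ' ') := by
    simp [pvAllowedB_eq]
  rw [hB]
  have h := pv_loop text.toList PySem.Set.empty [] (by intro c hc; cases hc)
  simp only [List.nil_append] at h
  exact congrArg (List.map String.ofList) h
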